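-- pv_equiv track=rewrite | github.com/mouseexe/OneShotCharacterGenerator | Util.py | dropLowest
-- ===== SOURCE A (Python) =====
-- def dropLowest(arr):
--     minIdx = 0
--     for idx in range(len(arr)):
--         if arr[idx] < arr[minIdx]:
--             minIdx = idx
--     total = 0
--     for idx in range(len(arr)):
--         if idx != minIdx:
--             total += arr[idx]
--     return total
-- ===== SOURCE B (Python) =====
-- def dropLowest(arr):
--     return sum(sorted(arr)[1:])
-- ===== Notes on version B (the rewrite author's own statement) =====
-- stated objective: simpler
-- what changed: Replaces the two index loops (find first-min index, then re-scan summing all other positions) with a one-liner: sort a copy, drop the first element, sum the rest.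
import Mathlib
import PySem

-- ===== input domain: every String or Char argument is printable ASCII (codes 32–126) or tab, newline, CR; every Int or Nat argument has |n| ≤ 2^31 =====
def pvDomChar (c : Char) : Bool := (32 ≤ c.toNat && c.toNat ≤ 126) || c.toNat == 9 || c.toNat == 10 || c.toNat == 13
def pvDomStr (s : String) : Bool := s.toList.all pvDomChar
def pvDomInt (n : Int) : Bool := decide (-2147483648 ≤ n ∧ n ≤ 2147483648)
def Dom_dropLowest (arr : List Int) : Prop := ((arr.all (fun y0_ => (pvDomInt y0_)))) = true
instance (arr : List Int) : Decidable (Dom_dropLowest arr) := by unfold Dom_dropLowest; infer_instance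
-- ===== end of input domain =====

-- B replaces A's two index loops (first-min index scan + re-scan summing the other positions)
-- with sum(sorted(arr)[1:]); objective: simpler.


-- ===== PORT A =====
def dropLowest (arr : List Int) : Int :=
  let minIdx : Int := (PySem.List.pyRange 0 (arr.length : Int) 1).foldl
    (fun minIdx idx =>
      if PySem.List.pyGetD arr idx 0 < PySem.List.pyGetD arr minIdx 0 then idx else minIdx) 0
  (PySem.List.pyRange 0 (arr.length : Int) 1).foldl
    (fun total idx => if idx ≠ minIdx then total + PySem.List.pyGetD arr idx 0 else total) 0

-- ===== PORT B =====
def dropLowest_alt (arr : List Int) : Int :=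
  (PySem.List.slice (PySem.List.sorted arr (fun x => x) false) (some 1) none).sum

-- ===== PRECONDITION & SPEC =====
def Spec_dropLowest (arr : List Int) (out : Int) : Prop := out = dropLowest_alt arr
instance (arr : List Int) (out : Int) : Decidable (Spec_dropLowest arr out) := by unfold Spec_dropLowest; infer_instance

-- ===== CLAIM (what is proved, stated in full; the proofs are below) =====
def Claim_equal_dropLowest : Prop := ∀ (arr : List Int), Dom_dropLowest arr → Spec_dropLowest arr (dropLowest arr)

-- ===== LEMMAS AND PROOFS =====

-- The first loop of A, cut off after the first m indices.
def pvMinIdx (arr : List Int) (m : Nat) : Int :=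
  (PySem.List.pyRange 0 (m : Int) 1).foldl
    (fun minIdx idx =>
      if PySem.List.pyGetD arr idx 0 < PySem.List.pyGetD arr minIdx 0 then idx else minIdx) 0

-- Invariant of A's first loop: the running index is in range and points at a minimum of the prefix.
lemma pvMinIdx_spec (arr : List Int) (m : Nat) (hm : 1 ≤ m) :
    0 ≤ pvMinIdx arr m ∧ pvMinIdx arr m < (m : Int) ∧
    ∀ i : Int, 0 ≤ i → i < (m : Int) →
      PySem.List.pyGetD arr (pvMinIdx arr m) 0 ≤ PySem.List.pyGetD arr i 0 := by
  induction m with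
  | zero => omega
  | succ k ih =>
    by_cases hk : 1 ≤ k
    · have hrec : pvMinIdx arr (k + 1)
          = (if PySem.List.pyGetD arr (k : Int) 0 < PySem.List.pyGetD arr (pvMinIdx arr k) 0
             then (k : Int) else pvMinIdx arr k) := by
        unfold pvMinIdx
        rw [show ((k + 1 : Nat) : Int) = (k : Int) + 1 by push_cast; ring,
          PySem.List.pyRange_one_succ_right (by positivity), List.foldl_append]
        simp
      obtain ⟨h0, h1, h2⟩ := ih hk
      rw [hrec]
      split_ifs with hlt
      · refine ⟨by positivity, by push_cast; omega, ?_⟩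
        intro i hi0 hi1
        by_cases hik : i < (k : Int)
        · exact le_trans (le_of_lt hlt) (h2 i hi0 hik)
        · have : i = (k : Int) := by push_cast at hi1 ⊢; omega
          simp [this]
      · refine ⟨h0, by push_cast; omega, ?_⟩
        intro i hi0 hi1
        by_cases hik : i < (k : Int)
        · exact h2 i hi0 hik
        · have : i = (k : Int) := by push_cast at hi1 ⊢; omega
          rw [this]; omega
    · have hk0 : k = 0 := by omega
      subst hk0
      have : pvMinIdx arr 1 = 0 := by
        unfold pvMinIdx
        rw [show ((1 : Nat) : Int) = 0 + 1 by norm_num, PySem.List.pyRange_one_singleton]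
        simp
      refine ⟨by rw [this], by rw [this]; norm_num, ?_⟩
      intro i hi0 hi1
      have hi : i = 0 := by omega
      rw [this, hi]

-- A's second loop: summing arr[i] over all indices except one in-range index j
-- gives arr.sum - arr[j].
lemma pvSecondLoop (arr : List Int) (j : Int) (hj0 : 0 ≤ j) (hj1 : j < (arr.length : Int)) :
    (PySem.List.pyRange 0 (arr.length : Int) 1).foldl
      (fun total idx => if idx ≠ j then total + PySem.List.pyGetD arr idx 0 else total) 0
    = arr.sum - PySem.List.pyGetD arr j 0 := by
  have hsplit : PySem.List.pyRange 0 (arr.length : Int) 1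
      = PySem.List.pyRange 0 j 1 ++ PySem.List.pyRange j (arr.length : Int) 1 :=
    PySem.List.pyRange_one_append 0 j _ hj0 (le_of_lt hj1)
  have hcons : PySem.List.pyRange j (arr.length : Int) 1
      = j :: PySem.List.pyRange (j + 1) (arr.length : Int) 1 :=
    PySem.List.pyRange_one_cons hj1
  have hfilter :
      (PySem.List.pyRange 0 (arr.length : Int) 1).filter (fun i => decide (i ≠ j))
      = PySem.List.pyRange 0 j 1 ++ PySem.List.pyRange (j + 1) (arr.length : Int) 1 := by
    have h1 : (PySem.List.pyRange 0 j 1).filter (fun i => decide (i ≠ j))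
        = PySem.List.pyRange 0 j 1 := by
      apply List.filter_eq_self.mpr
      intro a ha
      have := (PySem.List.mem_pyRange_one).mp ha
      simp; omega
    have h2 : (PySem.List.pyRange (j + 1) (arr.length : Int) 1).filter (fun i => decide (i ≠ j))
        = PySem.List.pyRange (j + 1) (arr.length : Int) 1 := by
      apply List.filter_eq_self.mpr
      intro a ha
      have := (PySem.List.mem_pyRange_one).mp ha
      simp; omega
    rw [hsplit, hcons, List.filter_append, List.filter_cons, h1, h2]
    simp
  have hsum_full :
      ((PySem.List.pyRange 0 (arr.length : Int) 1).map (fun i => PySem.List.pyGetD arr i 0)).sum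
      = arr.sum := by
    rw [PySem.List.map_pyGetD_pyRange_zero']
  rw [PySem.List.foldl_ite_eq_foldl_filter, PySem.List.foldl_add, hfilter]
  rw [hsplit, hcons] at hsum_full
  simp only [List.map_append, List.map_cons, List.sum_append, List.sum_cons] at hsum_full ⊢
  omega

-- Both sides of the final argument for a nonempty list: head of the sorted copy.
lemma pvGetD_mem (arr : List Int) (i : Int) (h0 : 0 ≤ i) (h1 : i < (arr.length : Int)) :
    PySem.List.pyGetD arr i 0 ∈ arr := by
  exact PySem.List.pyGetD_mem arr 0 (by simp [PySem.Raise.InRange]; omega)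

theorem dropLowest_spec : Claim_equal_dropLowest := by
  intro arr _
  unfold Spec_dropLowest dropLowest dropLowest_alt
  rcases hnil : arr with _ | ⟨x, rest⟩
  · simp [PySem.List.pyRange_one_eq_nil, PySem.List.sorted, PySem.List.slice]
  · rw [← hnil]
    have hne : arr ≠ [] := by rw [hnil]; simp
    have hlen : 1 ≤ arr.length := by rw [hnil]; simp
    -- the sorted copy is nonempty
    rcases hs : PySem.List.sorted arr (fun x => x) false with _ | ⟨m, t⟩
    · exact absurd ((PySem.List.sorted_eq_nil_iff arr (fun x => x) false).mp hs) hne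
    have hperm : (m :: t).Perm arr := hs ▸ PySem.List.sorted_perm arr (fun x => x) false
    have hsum : m + t.sum = arr.sum := by
      have := hperm.sum_eq; simpa using this
    have hmin : ∀ y ∈ arr, m ≤ y := by
      intro y hy
      exact PySem.List.key_head_sorted_le arr (fun x => x) hs y hy
    -- A's first loop lands on an index whose value is m
    obtain ⟨hj0, hj1, hjmin⟩ := pvMinIdx_spec arr arr.length hlen
    set j := pvMinIdx arr arr.length with hjdef
    have hjval : PySem.List.pyGetD arr j 0 = m := by
      apply le_antisymm
      · -- arr[j] ≤ m since m ∈ arr, i.e. m = arr[i] for some i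
        have hm_mem : m ∈ arr := hperm.mem_iff.mp (List.mem_cons_self)
        obtain ⟨i, hi, hieq⟩ := List.mem_iff_getElem.mp hm_mem
        have := hjmin (i : Int) (by positivity) (by exact_mod_cast hi)
        rw [PySem.List.pyGetD_eq_getElem (i := (i : Int)) arr 0 (by positivity)
          (by exact_mod_cast hi)] at this
        simpa [hieq] using this
      · exact hmin _ (pvGetD_mem arr j hj0 hj1)
    have hA := pvSecondLoop arr j hj0 hj1
    show (PySem.List.pyRange 0 (arr.length : Int) 1).foldl _ 0 = _
    rw [show (PySem.List.pyRange 0 (arr.length : Int) 1).foldl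
      (fun minIdx idx =>
        if PySem.List.pyGetD arr idx 0 < PySem.List.pyGetD arr minIdx 0 then idx else minIdx) 0
      = j from rfl]
    rw [hA, hjval, PySem.List.slice_from_one]
    simp
    omega
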